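-- pv_equiv track=rewrite | github.com/ClusterLabs/pcs | pcs_test/tools/bin_mock/pcmk/crm_resource_mock.py | get_arg_values
-- ===== SOURCE A (Python) =====
-- def get_arg_values(argv, name):
--     values = []
--     next_value = len(argv)
--     for i, value in enumerate(argv):
--         if value == name:
--             next_value = i + 1
--         elif i == next_value:
--             values.append(value)
--     return values
-- ===== SOURCE B (Python) =====
-- def get_arg_values(argv, name):
--     # repeatedly jump to the next occurrence of name and collect its
--     # successor (unless the successor is itself name)
--     values = []
--     rest = argv
--     while name in rest:
--         rest = rest[rest.index(name) + 1:]
--         if rest and rest[0] != name: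
--             values.append(rest[0])
--     return values
-- ===== Notes on version B (the rewrite author's own statement) =====
-- stated objective: alternative
-- what changed: Replaces A's single stateful element-by-element scan (next_value sentinel updated per element) with a find-and-slice loop that repeatedly jumps to the next occurrence of name via list.index, collects its successor unless that successor is itself name, and continues on the slice after the occurrence.
import Mathlib
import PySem

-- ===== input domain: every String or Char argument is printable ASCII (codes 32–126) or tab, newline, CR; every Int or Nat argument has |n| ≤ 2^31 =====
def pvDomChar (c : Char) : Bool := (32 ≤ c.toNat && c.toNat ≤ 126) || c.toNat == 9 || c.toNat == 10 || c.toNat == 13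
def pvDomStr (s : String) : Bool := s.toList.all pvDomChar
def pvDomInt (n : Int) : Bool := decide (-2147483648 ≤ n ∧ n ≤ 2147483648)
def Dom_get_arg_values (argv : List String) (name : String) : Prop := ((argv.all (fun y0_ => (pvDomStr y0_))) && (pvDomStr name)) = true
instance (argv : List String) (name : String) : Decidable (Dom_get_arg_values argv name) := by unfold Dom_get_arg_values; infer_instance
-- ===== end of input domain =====

-- B replaces A's single stateful scan by a find-next-occurrence-and-slice loop (objective: alternative, same cost).

-- ===== PORT A =====
def get_arg_values (argv : List String) (name : String) : List String :=
  -- values = []; next_value = len(argv); for i, value in enumerate(argv): ...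
  (PySem.List.enumerate argv |>.foldl
    (fun (st : List String × Int) iv =>
      if iv.2 == name then (st.1, iv.1 + 1)
      else if iv.1 == st.2 then (st.1 ++ [iv.2], st.2)
      else st)
    (([] : List String), (argv.length : Int))).1

-- ===== PORT B =====
-- termination helper for the port: the slice after a found occurrence is a strictly shorter list
theorem pv_slice_len_lt (l : List String) (v : String) (i : Nat)
    (h : PySem.List.index? l v = some i) :
    (PySem.List.slice l (some ((i : Int) + 1)) none).length < l.length := by
  rw [PySem.List.index?_eq_idxOf?, List.idxOf?_eq_some_iff] at h
  obtain ⟨hlt, -, -⟩ := h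
  have : ((i : Int) + 1) = ((i + 1 : Nat) : Int) := by push_cast; ring
  rw [this, PySem.List.slice_from_natCast]
  simp [List.length_drop]
  omega

-- port of Source B: the while loop becomes the structural recursion pvGoB on rest with
-- the accumulator values; 'name in rest' + 'rest.index(name)' is the match on
-- PySem.List.index? (none exactly when name not in rest); rest[i+1:] is
-- PySem.List.slice; 'if rest and rest[0] != name' is the match on the slice.
def pvGoB (name : String) (rest values : List String) : List String :=
  match h : PySem.List.index? rest name with
  | none => values
  | some i =>
    match htail : PySem.List.slice rest (some ((i : Int) + 1)) none with
    | y :: ys =>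
      if y ≠ name then pvGoB name (y :: ys) (values ++ [y])
      else pvGoB name (y :: ys) values
    | [] => pvGoB name [] values
termination_by rest.length
decreasing_by
  · have := pv_slice_len_lt rest name i h; rw [htail] at this; simpa using this
  · have := pv_slice_len_lt rest name i h; rw [htail] at this; simpa using this
  · have := pv_slice_len_lt rest name i h; simp only [List.length_nil]; omega

def get_arg_values_alt (argv : List String) (name : String) : List String :=
  pvGoB name argv []

-- ===== PRECONDITION & SPEC =====
def Spec_get_arg_values (argv : List String) (name : String) (out : List String) : Prop := out = get_arg_values_alt argv name
instance (argv : List String) (name : String) (out : List String) : Decidable (Spec_get_arg_values argv name out) := by unfold Spec_get_arg_values; infer_instance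

-- ===== CLAIM (what is proved, stated in full; the proofs are below) =====
def Claim_equal_get_arg_values : Prop := ∀ (argv : List String) (name : String), Dom_get_arg_values argv name → Spec_get_arg_values argv name (get_arg_values argv name)

-- ===== LEMMAS AND PROOFS =====

-- intermediate spec: p = "the previous element was name"
def pvS (name : String) : List String → Bool → List String
  | [], _ => []
  | x :: xs, p =>
    if x = name then pvS name xs true
    else (if p then [x] else []) ++ pvS name xs false

def pvF (name : String) : List String × Int → Int × String → List String × Int :=
  fun st iv =>
    if iv.2 == name then (st.1, iv.1 + 1)
    else if iv.1 == st.2 then (st.1 ++ [iv.2], st.2)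
    else st

theorem pvA_fold (name : String) (l : List String) :
    ∀ (k : Int) (vs : List String) (nv : Int),
      (nv = k ∨ nv < k ∨ nv ≥ k + l.length) →
      ((PySem.List.enumerate l k).foldl (pvF name) (vs, nv)).1
        = vs ++ pvS name l (decide (nv = k)) := by
  induction l with
  | nil => intro k vs nv _; simp [PySem.List.enumerate_nil, pvS]
  | cons x xs ih =>
    intro k vs nv hnv
    rw [PySem.List.enumerate_cons]
    simp only [List.foldl_cons]
    by_cases hx : x = name
    · have : pvF name (vs, nv) (k, x) = (vs, k + 1) := by
        simp [pvF, hx]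
      rw [this, ih (k + 1) vs (k + 1) (Or.inl rfl)]
      simp [pvS, hx]
    · by_cases hk : nv = k
      · have : pvF name (vs, nv) (k, x) = (vs ++ [x], nv) := by
          simp [pvF, hx, hk]
        rw [this, ih (k + 1) (vs ++ [x]) nv (by omega)]
        have hne : ¬ (nv = k + 1) := by omega
        simp [pvS, hx, hk]
      · have : pvF name (vs, nv) (k, x) = (vs, nv) := by
          simp [pvF, hx, show ¬ k = nv from fun h => hk h.symm]
        rw [this]
        have hnv' : nv = k + 1 ∨ nv < k + 1 ∨ nv ≥ (k + 1) + xs.length := by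
          rcases hnv with h | h | h
          · exact absurd h hk
          · right; left; omega
          · simp at h ⊢; omega
        rw [ih (k + 1) vs nv hnv']
        by_cases hne : nv = k + 1
        · have hlen : xs.length = 0 := by
            rcases hnv with h0 | h0 | h0
            · exact absurd h0 hk
            · omega
            · simp at h0; omega
          have hxs : xs = [] := List.length_eq_zero_iff.mp hlen
          subst hxs
          simp [pvS, hx, hk]
        · simp [pvS, hx, hk, hne]

-- prefix without name contributes nothing when p = false
theorem pvS_append_not_mem (name : String) (pre rest : List String)
    (h : name ∉ pre) : pvS name (pre ++ rest) false = pvS name rest false := by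
  induction pre with
  | nil => rfl
  | cons x xs ih =>
    have hx : ¬ x = name := fun he => h (by simp [he])
    simp only [List.cons_append, pvS, if_neg hx, if_neg Bool.false_ne_true]
    exact ih (fun hm => h (List.mem_cons_of_mem _ hm))

theorem pvS_nil_of_not_mem (name : String) (l : List String) (h : name ∉ l) :
    pvS name l false = [] := by
  simpa using pvS_append_not_mem name l [] h

-- after an occurrence: p = true collects the head (unless it is name) vs p = false
theorem pvS_true_eq (name : String) (l : List String) :
    pvS name l true = (match l with
                       | [] => []
                       | y :: _ => if y = name then [] else [y]) ++ pvS name l false := by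
  cases l with
  | nil => rfl
  | cons y ys => by_cases hy : y = name <;> simp [pvS, hy]

-- B's loop equals the intermediate spec
theorem pvGoB_eq_pvS (name : String) : ∀ (l vs : List String),
    pvGoB name l vs = vs ++ pvS name l false := by
  intro l
  induction hn : l.length using Nat.strong_induction_on generalizing l with
  | _ n ih =>
  subst hn
  intro vs
  rw [pvGoB]
  split
  · next hidx =>
    rw [pvS_nil_of_not_mem name l ((PySem.List.index?_eq_none_iff l name).mp hidx)]
    simp
  · next i hidx =>
    have h' := hidx
    rw [PySem.List.index?_eq_idxOf?, List.idxOf?_eq_some_iff] at h'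
    obtain ⟨hlt, hget, hpre⟩ := h'
    have hslice : PySem.List.slice l (some ((i : Int) + 1)) none = l.drop (i + 1) := by
      have : ((i : Int) + 1) = ((i + 1 : Nat) : Int) := by push_cast; ring
      rw [this, PySem.List.slice_from_natCast]
    have hdecomp : l = l.take i ++ name :: l.drop (i + 1) := by
      conv_lhs => rw [← List.take_append_drop i l]
      rw [← List.getElem_cons_drop hlt, hget]
    have hnotpre : name ∉ l.take i := by
      intro hm
      obtain ⟨j, hj, hje⟩ := List.mem_iff_getElem.mp hm
      have hjlt : j < i := by
        have := hj; simp [List.length_take] at this; omega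
      exact hpre j hjlt (by simpa [List.getElem_take] using hje)
    have hlen := pv_slice_len_lt l name i hidx
    rw [hslice] at hlen
    have hrhs : pvS name l false = pvS name (l.drop (i + 1)) true := by
      conv_lhs => rw [hdecomp]
      rw [pvS_append_not_mem name _ _ hnotpre]
      simp [pvS]
    rw [hrhs, pvS_true_eq]
    split
    · next y ys heq =>
      have hd : l.drop (i + 1) = y :: ys := by rw [← hslice, heq]
      have hrec : ∀ vs', pvGoB name (y :: ys) vs' = vs' ++ pvS name (y :: ys) false := by
        intro vs'
        apply ih (y :: ys).length _ (y :: ys) rfl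
        rw [← hd]; exact hlen
      rw [hd]
      by_cases hy : y = name
      · subst hy; simp [hrec]
      · simp [hy, hrec]
    · next heq =>
      have hd : l.drop (i + 1) = [] := by rw [← hslice, heq]
      rw [hd]
      simp [pvS, pvGoB]

-- ===== VERDICT (by name: the statement is the Claim_ definition above) =====
theorem get_arg_values_spec : Claim_equal_get_arg_values := by
  intro argv name _
  unfold Spec_get_arg_values get_arg_values get_arg_values_alt
  rw [pvGoB_eq_pvS]
  rw [List.nil_append]
  have hA := pvA_fold name argv 0 [] ((argv.length : Int))
    (by cases argv with
        | nil => exact Or.inl (by simp)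
        | cons x xs => exact Or.inr (Or.inr (by simp)))
  cases argv with
  | nil => simp [PySem.List.enumerate_nil, pvS]
  | cons x xs =>
    have h0 : (decide ((((x :: xs).length : Int)) = 0)) = false := by
      simp; omega
    rw [h0] at hA
    show (List.foldl (pvF name) (([] : List String), ((x :: xs).length : Int))
        (PySem.List.enumerate (x :: xs))).1 = _
    rw [hA]
    simp
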